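-- pv_equiv track=rewrite | github.com/a0908512313/Python | codeforces/Round 977/B.py | solve
-- ===== SOURCE A (Python) =====
-- def solve(n, x, arr):
--     num_set = set(arr)
--     mex = 0
--     while mex in num_set:
--         mex += 1
--
--     for num in range(max(0, mex - x), mex):
--         if num in num_set:
--             return mex + 1
--
--     return mex
-- ===== SOURCE B (Python) =====
-- def solve(n, x, arr):
--     mex = 0
--     for v in sorted(set(arr)):
--         if v == mex:
--             mex += 1
--         elif v > mex:
--             break
--     return mex + 1 if x >= 1 and mex >= 1 else mex
-- ===== Notes on version B (the rewrite author's own statement) =====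
-- stated objective: simpler
-- what changed: B computes the mex by a single scan over the sorted distinct values instead of unbounded hash probing, and replaces A's trailing window scan (which, when nonempty, always hits its first element) by the closed form mex+1 iff x>=1 and mex>=1.
import Mathlib
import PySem

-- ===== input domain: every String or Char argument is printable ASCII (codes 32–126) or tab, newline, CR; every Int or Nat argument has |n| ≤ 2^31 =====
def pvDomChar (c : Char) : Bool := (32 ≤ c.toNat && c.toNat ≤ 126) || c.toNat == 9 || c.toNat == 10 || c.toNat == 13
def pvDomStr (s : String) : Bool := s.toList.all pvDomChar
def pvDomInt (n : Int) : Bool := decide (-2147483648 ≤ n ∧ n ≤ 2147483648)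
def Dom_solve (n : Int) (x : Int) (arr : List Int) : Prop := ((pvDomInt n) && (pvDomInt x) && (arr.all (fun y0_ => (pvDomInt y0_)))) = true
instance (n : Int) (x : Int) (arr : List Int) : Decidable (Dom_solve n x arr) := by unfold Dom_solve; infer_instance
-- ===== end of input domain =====

-- B computes the mex by a single scan over the sorted distinct values instead of hash probing,
-- and replaces A's trailing window scan by the closed form mex+1 iff x>=1 and mex>=1.


-- ===== PORT A =====
-- 'while mex in num_set: mex += 1'; the fuel (arr.length + 1) is a totality guard only:
-- it is proved sufficient (exists_not_mem_ofList + mexLoop_spec below), so this computes exactly the Python loop.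
def mexLoop (s : PySem.Set Int) : Nat → Int → Int
  | 0, m => m
  | fuel+1, m => if PySem.Set.contains s m then mexLoop s fuel (m+1) else m

-- 'for num in range(...): if num in num_set: return mex + 1' / fall through: 'return mex'
def forLoopA (s : PySem.Set Int) (mex : Int) : List Int → Int
  | [] => mex
  | num :: rest => if PySem.Set.contains s num then mex + 1 else forLoopA s mex rest

def solve (n : Int) (x : Int) (arr : List Int) : Int :=
  let numSet : PySem.Set Int := PySem.Set.ofList arr
  let mex := mexLoop numSet (arr.length + 1) 0
  forLoopA numSet mex (PySem.List.pyRange (max 0 (mex - x)) mex 1)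

-- ===== PORT B =====
-- 'for v in sorted(set(arr)): if v == mex: mex += 1 elif v > mex: break'
def scanB : List Int → Int → Int
  | [], m => m
  | v :: rest, m => if v = m then scanB rest (m+1) else if v > m then m else scanB rest m

def solve_alt (n : Int) (x : Int) (arr : List Int) : Int :=
  let mex := scanB (PySem.List.sorted (PySem.Set.ofList arr) (fun v => v) false) 0
  if 1 ≤ x ∧ 1 ≤ mex then mex + 1 else mex

-- ===== PRECONDITION & SPEC =====
def Spec_solve (n : Int) (x : Int) (arr : List Int) (out : Int) : Prop := out = solve_alt n x arr
instance (n : Int) (x : Int) (arr : List Int) (out : Int) : Decidable (Spec_solve n x arr out) := by unfold Spec_solve; infer_instance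

-- ===== CLAIM (what is proved, stated in full; the proofs are below) =====
def Claim_equal_solve : Prop := ∀ (n : Int) (x : Int) (arr : List Int), Dom_solve n x arr → Spec_solve n x arr (solve n x arr)

-- ===== LEMMAS AND PROOFS =====

-- B's scan over a strictly increasing list computes a value r >= m that is not in the list,
-- while every integer in [m, r) is in the list.
theorem scanB_spec (vals : List Int) (hp : vals.Pairwise (· < ·)) :
    ∀ m : Int, m ≤ scanB vals m ∧ scanB vals m ∉ vals ∧
      (∀ k : Int, m ≤ k → k < scanB vals m → k ∈ vals) := by
  induction vals with
  | nil =>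
    intro m
    refine ⟨le_refl m, by simp [scanB], ?_⟩
    intro k h1 h2
    simp only [scanB] at h2
    omega
  | cons v rest ih =>
    rw [List.pairwise_cons] at hp
    obtain ⟨hv, hrest⟩ := hp
    have ihh := ih hrest
    intro m
    by_cases h1 : v = m
    · subst h1
      obtain ⟨ih1, ih2, ih3⟩ := ihh (v + 1)
      have hstep : scanB (v :: rest) v = scanB rest (v + 1) := by simp [scanB]
      rw [hstep]
      refine ⟨by omega, ?_, ?_⟩
      · simp only [List.mem_cons, not_or]
        exact ⟨by omega, ih2⟩
      · intro k hk1 hk2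
        rcases eq_or_lt_of_le hk1 with he | hlt
        · simp [← he]
        · exact List.mem_cons_of_mem _ (ih3 k (by omega) hk2)
    · by_cases h2 : v > m
      · have hstep : scanB (v :: rest) m = m := by simp [scanB, h1, h2]
        rw [hstep]
        refine ⟨le_refl m, ?_, by intro k hk1 hk2; omega⟩
        simp only [List.mem_cons, not_or]
        exact ⟨fun he => h1 he.symm, fun hm => by have := hv m hm; omega⟩
      · have hvm : v < m := lt_of_le_of_ne (not_lt.mp h2) h1
        obtain ⟨ih1, ih2, ih3⟩ := ihh m
        have hstep : scanB (v :: rest) m = scanB rest m := by simp [scanB, h1, h2]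
        rw [hstep]
        refine ⟨ih1, ?_, fun k hk1 hk2 => List.mem_cons_of_mem _ (ih3 k hk1 hk2)⟩
        simp only [List.mem_cons, not_or]
        exact ⟨by omega, ih2⟩

-- A's while loop, given enough fuel that some value in the window is missing from the set,
-- computes a value r >= m not in the set, with every integer in [m, r) in the set.
theorem mexLoop_spec (fuel : Nat) : ∀ (s : PySem.Set Int) (m : Int),
    (∃ k : Int, m ≤ k ∧ k < m + fuel ∧ k ∉ s) →
    m ≤ mexLoop s fuel m ∧ mexLoop s fuel m ∉ s ∧
      (∀ j : Int, m ≤ j → j < mexLoop s fuel m → j ∈ s) := by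
  induction fuel with
  | zero =>
    intro s m ⟨k, hk1, hk2, _⟩
    simp only [Nat.cast_zero, add_zero] at hk2
    omega
  | succ fuel ih =>
    intro s m ⟨k, hk1, hk2, hk3⟩
    by_cases hm : m ∈ s
    · have hc : PySem.Set.contains s m = true := (PySem.Set.contains_iff s m).mpr hm
      have hkm : k ≠ m := fun he => hk3 (he ▸ hm)
      obtain ⟨ih1, ih2, ih3⟩ := ih s (m + 1) ⟨k, by omega, by push_cast at hk2 ⊢; omega, hk3⟩
      have hstep : mexLoop s (fuel + 1) m = mexLoop s fuel (m + 1) := by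
        simp [mexLoop, hc, hm]
      rw [hstep]
      refine ⟨by omega, ih2, ?_⟩
      intro j hj1 hj2
      rcases eq_or_lt_of_le hj1 with he | hlt
      · exact he ▸ hm
      · exact ih3 j (by omega) hj2
    · have hc : ¬ (PySem.Set.contains s m = true) :=
        fun h => hm ((PySem.Set.contains_iff s m).mp h)
      have hstep : mexLoop s (fuel + 1) m = m := by simp [mexLoop, hc, hm]
      rw [hstep]
      exact ⟨le_refl m, hm, fun j hj1 hj2 => absurd hj2 (by omega)⟩

-- Pigeonhole: among 0 .. arr.length there is an integer not in set(arr).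
theorem exists_not_mem_ofList (arr : List Int) :
    ∃ k : Int, 0 ≤ k ∧ k < 0 + ((arr.length + 1 : Nat) : Int) ∧ k ∉ PySem.Set.ofList arr := by
  by_contra hcon
  push_neg at hcon
  have hsub : PySem.List.pyRange 0 ((arr.length : Int) + 1) 1 ⊆ PySem.Set.ofList arr := by
    intro y hy
    rw [PySem.List.mem_pyRange_one] at hy
    exact hcon y hy.1 (by have := hy.2; push_cast; omega)
  have hle := ((PySem.List.nodup_pyRange_one 0 ((arr.length : Int) + 1)).subperm hsub).length_le
  rw [PySem.List.length_pyRange_one] at hle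
  have h2 := PySem.Set.length_ofList_le arr
  omega

-- The least nonnegative integer not satisfying P is unique.
theorem mex_unique (P : Int → Prop) (r1 r2 : Int)
    (h1 : 0 ≤ r1) (h2 : 0 ≤ r2) (n1 : ¬ P r1) (n2 : ¬ P r2)
    (a1 : ∀ k, 0 ≤ k → k < r1 → P k) (a2 : ∀ k, 0 ≤ k → k < r2 → P k) : r1 = r2 := by
  rcases lt_trichotomy r1 r2 with h | h | h
  · exact absurd (a2 r1 h1 h) n1
  · exact h
  · exact absurd (a1 r2 h2 h) n2

-- ===== VERDICT (by name: the statement is the Claim_ definition above) =====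
theorem solve_spec : Claim_equal_solve := by
  intro n x arr _
  unfold Spec_solve solve solve_alt
  set s : PySem.Set Int := PySem.Set.ofList arr with hs
  set vals : List Int := PySem.List.sorted s (fun v => v) false with hvals
  set r : Int := mexLoop s (arr.length + 1) 0 with hr
  set r' : Int := scanB vals 0 with hr'
  show forLoopA s r (PySem.List.pyRange (max 0 (r - x)) r 1) = if 1 ≤ x ∧ 1 ≤ r' then r' + 1 else r'
  obtain ⟨ha1, ha2, ha3⟩ := mexLoop_spec (arr.length + 1) s 0 (exists_not_mem_ofList arr)
  have hpair : vals.Pairwise (· < ·) := PySem.List.sorted_ofList_pairwise_lt (xs := arr)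
  obtain ⟨hb1, hb2, hb3⟩ := scanB_spec vals hpair 0
  have hmemv : ∀ k : Int, k ∈ vals ↔ k ∈ arr := by
    intro k
    rw [hvals, PySem.List.mem_sorted, hs, PySem.Set.mem_ofList]
  have hmems : ∀ k : Int, k ∈ s ↔ k ∈ arr := by
    intro k
    rw [hs, PySem.Set.mem_ofList]
  have hrr : r = r' :=
    mex_unique (fun k => k ∈ arr) r r' ha1 hb1
      (fun h => ha2 ((hmems r).mpr h)) (fun h => hb2 ((hmemv r').mpr h))
      (fun k hk1 hk2 => (hmems k).mp (ha3 k hk1 hk2))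
      (fun k hk1 hk2 => (hmemv k).mp (hb3 k hk1 hk2))
  rw [← hrr]
  by_cases hx : 1 ≤ x ∧ 1 ≤ r
  · have hlt : max 0 (r - x) < r := max_lt_iff.mpr ⟨by omega, by omega⟩
    have hmem : max 0 (r - x) ∈ s := ha3 _ (le_max_left 0 _) hlt
    rw [PySem.List.pyRange_one_cons hlt, if_pos hx]
    simp [forLoopA, hmem]
  · have hge : r ≤ max 0 (r - x) := le_max_iff.mpr (by omega)
    rw [PySem.List.pyRange_one_eq_nil hge, if_neg hx]
    simp [forLoopA]
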